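/-
  THE STUB `_start` OF THE BASE IMAGE, PROVED ONCE FOR EVERY PROGRAM (c/base/start.S, 13 instructions at 100000H: the same bytes in
  every program linked against the base image).

      Top.MainPre globals len v     what is known of the state at the entry of `prog_main` (105000H, a constant of the link script):
                                    the six argument registers, `len ≤ 1FF000H`, and the shadow layer after `run_ctors` — the
                                    registered globals, IN and OUT live, no protected frame, the clean stack ending at `rsp + 8` —,
                                    and the invariant of the EMPTY HEAP `Heap.empty 800000H C00000H` over that layer (`.heap`: a
                                    program without a heap does not look at it)
      Top.mainPre_heapPre           `MainPre` gives `HeapPre T (Heap.empty 800000H C00000H) (globals ++ initialObjs len) [] v`, the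
                                    common precondition of the heap's contracts (ProgX/Spec/Heap.lean): a program with a heap
                                    asks `HeapPre` in its `prog_main` contract and gets it here
      Top.mainPre_live_in / _out    IN (`len` bytes at 200000H) and OUT (300000H bytes at 400000H) are live objects of that layer
      Top.stub_reaches              THE THEOREM: for the runtime record `R` of a program on the base image (`R.sym = rtSym ctor`),
                                    the contract of `run_ctors` for `R`, and ANY contract `s len` of `prog_main` whose precondition
                                    follows from `MainPre` and whose frame fits the stack (`≤ FFFF8H`),
                                    `Top.StubReaches T L.exit R L._start.entry globals Lay μ u₀`

  HOW A PROGRAM USES IT (the toy: Toy/Spec/Proved/start.lean could be these five lines):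
      refine ProgX.Base.Top.stub_reaches hLay hμ hcode Toy.Spec.rt rfl Toy.Globals.objs (by decide) (by decide) (by decide)
        (fun len => Toy.Spec.prog_main.spec (Toy.Globals.objs ++ initialObjs len) []) (fun _ => by decide) ?_ h_run_ctors
        (fun len => h_prog_main _ _)
      intro len v hv      -- prog_main's precondition from `MainPre`: the program's own part

  WHY NO HYPOTHESIS ABOUT `s.writes`, AND WHY THE WALKER NEVER SEES AN ABSTRACT `s.frame`: the stub needs nothing of the memory
  after `prog_main` but the text (`Returned.code`) — its three stores go to literal addresses inside the layout. So the contract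
  of `prog_main` is first weakened (`Calls.weaken`) to `Top.stubMainSpec`: pre = `MainPre`, post = `True`, frame = FFFF8H (all the
  stack there is below 7FFFF8H), one window `[0, 2^64)`. That Spec has `vspec` rules with numerals, and the walk is that of a
  concrete program.
-/
import ProgX.Top
import ProgX.Base.Spec.Runtime
import ProgX.Spec.Heap
namespace ProgX.Base
open X86 X86.User Asan ProgX

set_option maxRecDepth 4000
set_option maxHeartbeats 4000000

/-- `prog_main`: the address the stub calls, a constant of the link script (the same in every image; `Symbols.prog_main`). -/
abbrev L.prog_main.entry : Word := 0x105000

/-! ### What `run_ctors` needs and leaves, for any descriptor table (these belong next to the definitions in Asan/Runtime.lean) -/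

/-- Every window `__asan_register_globals` may write lies in the shadow OF THE IMAGE, `[C00000H, C40000H)`: the slot of a sane
descriptor lies in the image, below 200000H. (So it is off the data space, and below the shadow of the heap region,
`[D00000H, D80000H)`.) -/
theorem Top.registerWrites_shadow (descs : List GlobalDesc) (hok : ∀ d, d ∈ descs → d.OK) :
    ∀ w, w ∈ registerWrites descs → 0xC00000 ≤ w.lo ∧ w.hi ≤ 0xC40000 := by
  intro w hw
  unfold registerWrites at hw
  obtain ⟨d, hd, rfl⟩ := List.mem_map.mp hw
  obtain ⟨d1, d2, d3, d4, d5⟩ := hok d hd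
  unfold shadowSpan
  simp only
  omega

/-- `.init_array` is still in a memory that agrees with the first one on the image's data (the slot at `initArrayStart`). -/
theorem Top.stub_ctorIn_eqOn {mem mem' : Mem} {S : RtSymbols} (h : CtorIn mem S) (he : Mem.EqOn 0x100000 0x700000 mem mem')
    (h1 : 0x100000 ≤ S.initArrayStart) (h2 : S.initArrayStart + 8 ≤ 0x700000) : CtorIn mem' S := by
  obtain ⟨k1, k2⟩ := h
  refine ⟨k1, ?_⟩
  have e : (UInt64.ofNat S.initArrayStart).toNat = S.initArrayStart := by
    rw [UInt64.toNat_ofNat']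
    omega
  rw [he.readLE _ 8 (by omega) (by omega) (by omega)]
  exact k2

/-- The descriptor table is still in a memory that agrees with the first one on the image's data. -/
theorem Top.stub_descsIn_eqOn {mem mem' : Mem} {table : Nat} {descs : List GlobalDesc} (h : DescsIn mem table descs)
    (he : Mem.EqOn 0x100000 0x700000 mem mem') (h1 : 0x100000 ≤ table) (h2 : table + 64 * descs.length ≤ 0x700000) :
    DescsIn mem' table descs := by
  intro i hi
  obtain ⟨k1, k2, k3⟩ := h i hi
  have e1 : (UInt64.ofNat (table + 64 * i)).toNat = table + 64 * i := by
    rw [UInt64.toNat_ofNat']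
    omega
  have e2 : (UInt64.ofNat (table + 64 * i + 8)).toNat = table + 64 * i + 8 := by
    rw [UInt64.toNat_ofNat']
    omega
  have e3 : (UInt64.ofNat (table + 64 * i + 16)).toNat = table + 64 * i + 16 := by
    rw [UInt64.toNat_ofNat']
    omega
  refine ⟨?_, ?_, ?_⟩
  · rw [he.readLE _ 8 (by omega) (by omega) (by omega)]
    exact k1
  · rw [he.readLE _ 8 (by omega) (by omega) (by omega)]
    exact k2
  · rw [he.readLE _ 8 (by omega) (by omega) (by omega)]
    exact k3

/-! ### The state at the entry of `prog_main` -/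

/-- **What is known of the state at the entry of `prog_main`** when the stub calls it (RIP = 105000H is `AtEntry`'s): the six
parameter words in the argument registers — `in` = 200000H, `len`, `out` = 400000H, `cap` = 300000H, `heap` = 800000H,
`heap_len` = 400000H —, `len ≤ 1FF000H`, the shadow clause for the registered globals, IN and OUT, no protected frame, and the
invariant of the EMPTY heap over the same objects (`heap`: the region [800000H, C00000H) is as in the start state — the control
cell reads 0, all of it is poisoned; a program without a heap ignores the field). -/
structure Top.MainPre (globals : List Obj) (len : Nat) (v : State) : Prop where
  rdi : v.reg .rdi = 0x200000
  rsi : v.reg .rsi = UInt64.ofNat len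
  rdx : v.reg .rdx = 0x400000
  rcx : v.reg .rcx = 0x300000
  r8 : v.reg .r8 = 0x800000
  r9 : v.reg .r9 = 0x400000
  len_le : len ≤ 0x1FF000
  shadow : ShadowPre (globals ++ initialObjs len) [] v
  heap : HeapInv (Heap.empty 0x800000 0xC00000) (globals ++ initialObjs len) [] ((v.reg .rsp).toNat + 8) v.mem

/-- The second argument as a number: the length of the input. -/
theorem Top.MainPre.rsi_toNat {globals : List Obj} {len : Nat} {v : State} (h : Top.MainPre globals len v) :
    (v.reg .rsi).toNat = len := by
  have hl := h.len_le
  rw [h.rsi, UInt64.toNat_ofNat']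
  omega

/-- The input `IN` (`len` bytes at 200000H) is a live object at the entry of `prog_main`. -/
theorem Top.mainPre_live_in (globals : List Obj) (len : Nat) : LiveIn (globals ++ initialObjs len) [] 0x200000 len := by
  refine ⟨objIN len, ?_, Nat.le_refl _, Nat.le_refl _⟩
  apply List.mem_append_right
  apply List.mem_append_right
  unfold initialObjs
  exact List.mem_cons_self

/-- Every range inside the output `OUT` (300000H bytes at 400000H) is live at the entry of `prog_main`. -/
theorem Top.mainPre_live_out (globals : List Obj) (len : Nat) (a n : Nat) (h1 : 0x400000 ≤ a) (h2 : a + n ≤ 0x700000) :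
    LiveIn (globals ++ initialObjs len) [] a n := by
  refine ⟨objOUT, ?_, h1, h2⟩
  apply List.mem_append_right
  apply List.mem_append_right
  unfold initialObjs
  exact List.mem_cons_of_mem _ List.mem_cons_self

/-- No live object at the entry of `prog_main` lies in the text window, if no registered global does (per program: `by decide`). -/
theorem Top.mainPre_offText (globals : List Obj) (len : Nat) (hoff : ∀ o, o ∈ globals → T.hi ≤ o.base) :
    ∀ o, o ∈ globals ++ initialObjs len → T.hi ≤ o.base := by
  intro o ho
  rcases List.mem_append.mp ho with hg | hi
  · exact hoff o hg
  · unfold initialObjs at hi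
    simp only [List.mem_cons, List.not_mem_nil, or_false] at hi
    rcases hi with rfl | rfl
    · show T.hi ≤ 0x200000
      decide
    · show T.hi ≤ 0x400000
      decide

/-- **The common precondition of the heap's contracts** (ProgX/Spec/Heap.lean: `malloc.spec T H rest frames` …) at the entry of
`prog_main`, for the EMPTY heap: a program with a heap states `HeapPre ProgX.Base.T (Heap.empty 0x800000 0xC00000) …` in the
precondition of its `prog_main` and discharges it in its `hpre` by this lemma. -/
theorem Top.mainPre_heapPre {globals : List Obj} {len : Nat} {v : State} (h : Top.MainPre globals len v) :
    ProgX.Spec.HeapPre T (Heap.empty 0x800000 0xC00000) (globals ++ initialObjs len) [] v where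
  inv := h.heap
  base := rfl
  limit := rfl
  text := by decide
  offText := h.shadow.offText

/-- The objects of a sane descriptor table end below the heap region (in fact below 200000H): `stub_reaches`'s `hglobals_lo` for
`globals = (descs.map GlobalDesc.obj).reverse`, the form of every generated `Globals.objs` (or, per program: `by decide`). -/
theorem Top.globals_below_heap (descs : List GlobalDesc) (hok : ∀ d, d ∈ descs → d.OK) :
    ∀ o, o ∈ (descs.map GlobalDesc.obj).reverse → o.base + o.size ≤ 0x800000 := by
  intro o ho
  obtain ⟨d, hd, rfl⟩ := List.mem_map.mp (List.mem_reverse.mp ho)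
  obtain ⟨d1, d2, d3, d4, d5⟩ := hok d hd
  unfold GlobalDesc.obj
  simp only
  omega

/-- **The contract of `prog_main` as the stub uses it**: entered with `MainPre`, it returns; nothing else is asked of it. The
frame is all the stack below the stub's `call` (rsp = 7FFFF8H at the entry), the one window is the whole memory. -/
def Top.stubMainSpec (globals : List Obj) (len : Nat) : Spec where
  pre := Top.MainPre globals len
  post _ _ := True
  frame := 0xFFFF8
  writes _ := [⟨0, 2 ^ 64⟩]

@[vspec] theorem Top.stubMainSpec_frame (globals : List Obj) (len : Nat) : (Top.stubMainSpec globals len).frame = 0xFFFF8 :=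
  id rfl

@[vspec] theorem Top.stubMainSpec_writes (globals : List Obj) (len : Nat) (u : State) :
    (Top.stubMainSpec globals len).writes u = [⟨0, 2 ^ 64⟩] := id rfl

/-- Any contract of `prog_main` whose precondition follows from `MainPre` and whose frame fits the stack gives `stubMainSpec`. -/
theorem Top.stubMainSpec_of {Lay : Layout} {μ : Microarch} {u₀ : State} {globals : List Obj} {len : Nat} {s : Spec}
    (hframe : s.frame ≤ 0xFFFF8) (hpre : ∀ v, Top.MainPre globals len v → s.pre v)
    (h : Calls Lay μ WayInv (conv u₀) L.prog_main.entry s) :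
    Calls Lay μ WayInv (conv u₀) L.prog_main.entry (Top.stubMainSpec globals len) := by
  intro u ret he hp
  -- the frame: `s` asks for less stack
  have hroom : (conv u₀).stackLo + s.frame ≤ (u.reg .rsp).toNat :=
    Nat.le_trans (Nat.add_le_add_left hframe _) he.room
  have he' : AtEntry (conv u₀) L.prog_main.entry s.frame ret u :=
    ⟨he.rip, he.retAddr, he.ret_lt, he.align, hroom, he.top, he.code, he.inv⟩
  refine (h u ret he' (hpre u hp)).mono ?_
  intro v hv
  refine ⟨hv.rip, hv.rsp, hv.saved, ?_, hv.code, hv.inv, True.intro⟩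
  -- the footprint: no address lies outside the window `[0, 2^64)`, so nothing is claimed
  intro a ha
  have hwin := ha ⟨0, 2 ^ 64⟩ (List.mem_cons_of_mem _ List.mem_cons_self)
  have hlt := UInt64.toNat_lt a
  simp only at hwin
  omega

/-! ### The stub's walk -/

/-- **THE STUB `_start` REACHES `prog_exit`, FOR EVERY PROGRAM ON THE BASE IMAGE.** `R`: the program's runtime record (the base's
entry points with the program's constructor: `hR`; its descriptor table inside the image's data: `htable`); `globals`: the
objects of its registered globals, none in the text window (`hoff`), all below the heap region (`hglobals_lo`: `by decide`, or
`Top.globals_below_heap`); `s len`: the contract of its `prog_main` for an input of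
`len` bytes (`h_main`), with a frame that fits the stack (`hframe`) and a precondition that follows from `Top.MainPre` (`hpre`:
the program's own part of the stub's proof). The walk: `call run_ctors` (0x100000; `.init_array` and the table are read in a
memory that differs from the start memory by the pushed return address), the six parameter loads through run_ctors's footprint
(32 bytes of stack, shadow bytes), `call prog_main` (0x100035; `MainPre` from `StartOK.registered`; its `heap` field from `StartOK.heap_cell` / `.heap_poisoned`: up to there only
stack bytes below 800000H and shadow bytes of the image, below D00000H, were written), three unchecked stores at
literal addresses, RIP = `L.exit`. -/
theorem Top.stub_reaches {Lay : Layout} (hLay : Lay.hi = 0x1000000) {μ : Microarch} (hμ : UserX.MicroOK μ) {u₀ : State}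
    (hcode : HasCodeNat Lay u₀ L._start.entry Code.code__start.nat L._start.size)
    (R : Runtime) (hR : R.sym = Spec.rtSym R.sym.ctor) (globals : List Obj)
    (hoff : ∀ o, o ∈ globals → T.hi ≤ o.base) (hglobals_lo : ∀ o, o ∈ globals → o.base + o.size ≤ 0x800000)
    (htable : 0x100000 ≤ R.table ∧ R.table + 64 * R.descs.length ≤ 0x700000)
    (s : Nat → Spec) (hframe : ∀ len, (s len).frame ≤ 0xFFFF8)
    (hpre : ∀ len v, Top.MainPre globals len v → (s len).pre v)
    (h_run_ctors : Calls Lay μ WayInv (conv u₀) L.run_ctors.entry (runCtorsSpec R))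
    (h_main : ∀ len, Calls Lay μ WayInv (conv u₀) L.prog_main.entry (s len)) :
    Top.StubReaches T L.exit R L._start.entry globals Lay μ u₀ := by
  intro len u hst hco
  -- `.init_array` of the base image: the one slot at 141000H
  have e_init : R.sym.initArrayStart = 0x141000 := by
    rw [hR]
    rfl
  -- the start state's facts under the names the walker reads (there is no `AtEntry`: nothing called the stub)
  have w_rip : u.rip = L._start.entry := hst.rip
  have c_rsp : u.reg .rsp = 0x800000 := hst.rsp
  have w_eq : Mem.EqOn L.textLo L.textHi u₀.mem u.mem := hco
  have hdf : u.flags .df = false := (show abiInv _ from hst.inv).1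
  have hmx : u.mxcsr &&& 0x1F80 = 0x1F80 := (show abiInv _ from hst.inv).2
  have hsse := sseOK_of_abiInv hst.inv
  have w_kept : RegsKept [.rsp] u u := RegsKept.refl _ _
  -- the contract of `prog_main` in the form the walk uses: numerals for the frame and the window
  have hmain := Top.stubMainSpec_of (globals := globals) (hframe len) (hpre len) (h_main len)
  -- 0x100000: call run_ctors
  u_walk hcode [hμ.vendor] span [L.textLo, L.textHi] side (v_side)
  case call_inv =>
    v_inv
  case pre_100000 =>
    -- run_ctors reads `.init_array` and the descriptor table in the memory after the push of its return address
    have hdata : Mem.EqOn 0x100000 0x700000 u.mem s_100000.mem := by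
      rw [w_mem]
      exact Mem.EqOn.writeLE _ _ _ _ _ _ (by decide) (by decide)
    exact ⟨Top.stub_ctorIn_eqOn hst.ctor hdata (by omega) (by omega), Top.stub_descsIn_eqOn hst.descs hdata htable.1 htable.2,
      hst.descs_ok⟩
  -- 0x100005 (ret1): the state run_ctors returned
  v_after_call w_rsp_100000 w_mem_100000
  -- the image's data and the parameter block are off run_ctors's footprint (32 bytes of stack, shadow bytes)
  have hdataR : Mem.EqOn 0x100000 0x700000 u.mem s_100000r.mem := by
    refine Mem.EqOn.step_same (Mem.EqOn.writeLE _ _ _ _ _ _ (by decide) (by decide)) w_same ?_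
    intro w hw
    rcases List.mem_cons.mp hw with rfl | hw
    · left
      decide
    · have hshadow := Top.registerWrites_shadow _ hst.descs_ok w hw
      omega
  -- … and so are the heap region [800000H, C00000H) and its shadow [D00000H, D80000H) (the globals' shadow ends below C40000H)
  have hheapR : Mem.EqOn 0x800000 0xC00000 u.mem s_100000r.mem := by
    refine Mem.EqOn.step_same (Mem.EqOn.writeLE _ _ _ _ _ _ (by decide) (by decide)) w_same ?_
    intro w hw
    rcases List.mem_cons.mp hw with rfl | hw
    · right
      decide
    · have hshadow := Top.registerWrites_shadow _ hst.descs_ok w hw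
      omega
  have hheapShR : Mem.EqOn 0xD00000 0xD80000 u.mem s_100000r.mem := by
    refine Mem.EqOn.step_same (Mem.EqOn.writeLE _ _ _ _ _ _ (by decide) (by decide)) w_same ?_
    intro w hw
    rcases List.mem_cons.mp hw with rfl | hw
    · right
      decide
    · have hshadow := Top.registerWrites_shadow _ hst.descs_ok w hw
      omega
  have hshR : Mem.EqOn 0xC00000 0xE00000 u.mem s_100000.mem := by
    rw [w_mem_100000]
    exact Mem.EqOn.writeLE _ _ _ _ _ _ (by decide) (by decide)
  have p_in : s_100000r.mem.readLE 0x1FF000 8 = 0x200000 := by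
    rw [hdataR.readLE _ 8 (by decide) (by decide) (by decide)]
    exact hst.param_in
  have p_len : s_100000r.mem.readLE 0x1FF008 8 = len := by
    rw [hdataR.readLE _ 8 (by decide) (by decide) (by decide)]
    exact hst.param_len
  have p_out : s_100000r.mem.readLE 0x1FF010 8 = 0x400000 := by
    rw [hdataR.readLE _ 8 (by decide) (by decide) (by decide)]
    exact hst.param_out
  have p_cap : s_100000r.mem.readLE 0x1FF018 8 = 0x300000 := by
    rw [hdataR.readLE _ 8 (by decide) (by decide) (by decide)]
    exact hst.param_cap
  have p_heap : s_100000r.mem.readLE 0x1FF030 8 = 0x800000 := by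
    rw [hdataR.readLE _ 8 (by decide) (by decide) (by decide)]
    exact hst.param_heap
  have p_hlen : s_100000r.mem.readLE 0x1FF038 8 = 0x400000 := by
    rw [hdataR.readLE _ 8 (by decide) (by decide) (by decide)]
    exact hst.param_heap_len
  have hpostR : Mem.EqOn 0xC00000 0xE00000 (registerMem s_100000.mem R.descs) s_100000r.mem := w_post
  clear w_same w_post
  -- 0x100005 … 0x100035: the six parameter loads, call prog_main
  u_walk hcode [hμ.vendor] span [L.textLo, L.textHi] side (v_side)
  case call_inv =>
    v_inv
  case pre_100035 =>
    -- the push of the return address went to the stack: off the shadow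
    have hsh35 : Mem.EqOn 0xC00000 0xE00000 s_100000r.mem s_100035.mem := by
      rw [w_mem]
      exact Mem.EqOn.writeLE _ _ _ _ _ _ (by decide) (by decide)
    -- the shadow layer after the registration of the globals, the clean stack ending at 800000H = rsp + 8
    have hinv : ShadowInv (globals ++ initialObjs len) [] ((s_100035.reg .rsp).toNat + 8) s_100035.mem := by
      rw [w_rsp]
      exact hst.registered s_100000.mem s_100035.mem hshR (hpostR.trans hsh35)
    -- the heap region and its shadow are still the start state's: the push went to the stack
    have hheap35 : Mem.EqOn 0x800000 0xC00000 u.mem s_100035.mem := by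
      rw [w_mem]
      exact hheapR.step_writeLE _ _ _ (by decide) (by decide)
    have hheapSh35 : Mem.EqOn 0xD00000 0xD80000 u.mem s_100035.mem := by
      rw [w_mem]
      exact hheapShR.step_writeLE _ _ _ (by decide) (by decide)
    have hcell : s_100035.mem.readLE 0x800000 8 = 0 := by
      rw [hheap35.readLE _ 8 (by decide) (by decide) (by decide)]
      exact hst.heap_cell
    have hpois : ∀ g, 0x800000 / 8 ≤ g → g < 0xC00000 / 8 → 128 ≤ shadowOf s_100035.mem g := by
      intro g hg1 hg2
      have e := shadowAddr_toNat g (by omega)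
      have hsame : shadowOf s_100035.mem g = shadowOf u.mem g := by
        unfold shadowOf
        rw [hheapSh35 (shadowAddr g) (by omega) (by omega)]
      rw [hsame]
      exact hst.heap_poisoned g hg1 hg2
    -- no object of the layer lies in the heap region: the globals and IN, OUT end below it
    have hout : ∀ o, o ∈ globals ++ initialObjs len → o.base + o.size ≤ 0x800000 ∨ 0xC00000 ≤ o.base := by
      intro o ho
      rcases List.mem_append.mp ho with hg | hi
      · exact Or.inl (hglobals_lo o hg)
      · exact Top.initialObjs_off_heap len hst.len_le o hi
    exact ⟨w_rdi, w_rsi, w_rdx, w_rcx, w_r8, w_r9, hst.len_le, ⟨hinv, Top.mainPre_offText globals len hoff⟩,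
      Top.heapInv_empty hinv hcell hpois hout⟩
  -- 0x10003a (ret2): the state prog_main returned; its result is any word, its footprint is not needed
  v_after_call w_rsp_100035 w_mem_100035
  obtain ⟨z, w_rax⟩ : ∃ z, s_100035r.reg .rax = z := ⟨_, rfl⟩
  clear w_same w_post
  -- 0x10003a … 0x100056: the three unchecked stores of the result, `prog_exit: hlt` not yet executed
  u_walk hcode [hμ.vendor] until [L.exit] span [L.textLo, L.textHi] side (v_side)
  -- 0x100056: EXIT
  refine ReachVia.done ?_
  exact w_rip

end ProgX.Base
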